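-- pv_equiv track=rewrite | github.com/t-g-tg/fs | src/form_sender/analyzer/unmapped_element_handler.py | _choose_priority_index
-- ===== SOURCE A (Python) =====
-- from typing import Dict, List, Any, Optional, Callable, Awaitable, Tuple
--
-- def _choose_priority_index(
--
--     texts: List[str],
--     pri1: List[str],
--     pri2: List[str],
--     pri3: Optional[List[str]] = None,
--     exclude_text_tokens: Optional[List[str]] = None,
--     values: Optional[List[str]] = None,
-- ) -> int:
--     def is_excluded(i: int) -> bool:
--         try:
--             if values is not None:
--                 v = (values[i] or "").strip()
--                 if v == "":
--                     return True
--                 if any(tok in v.lower() for tok in ["select", "choose", "---", "none"]):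
--                     return True
--             if exclude_text_tokens:
--                 tl = (texts[i] or "").lower()
--                 if any(tok in tl for tok in exclude_text_tokens):
--                     return True
--         except Exception:
--             return False
--         return False
--
--     def last_match(keys: List[str]) -> Optional[int]:
--         idxs: List[int] = []
--         low_keys = [k.lower() for k in (keys or [])]
--         for i, t in enumerate(texts):
--             tl = (t or "").lower()
--             if any(k in tl for k in low_keys):
--                 if not is_excluded(i):
--                     idxs.append(i)
--         return idxs[-1] if idxs else None
--
--     idx = last_match(pri1)
--     if idx is not None:
--         return idx
--     idx = last_match(pri2)
--     if idx is not None: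
--         return idx
--     if pri3:
--         idx = last_match(pri3)
--         if idx is not None:
--             return idx
--     # 最後のフォールバック: 除外されていない最後の選択肢
--     for i in range(len(texts) - 1, -1, -1):
--         if not is_excluded(i):
--             return i
--     return max(0, len(texts) - 1)
-- ===== SOURCE B (Python) =====
-- def _choose_priority_index(
--     texts,
--     pri1,
--     pri2,
--     pri3=None,
--     exclude_text_tokens=None,
--     values=None,
-- ):
--     bad = ["select", "choose", "---", "none"]
--     low1 = [k.lower() for k in pri1]
--     low2 = [k.lower() for k in pri2]
--     low3 = [k.lower() for k in (pri3 or [])]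
--
--     def excluded(i, t):
--         if values is not None:
--             if i >= len(values):
--                 return False  # no value paired with this option: nothing to judge it by
--             v = values[i].strip()
--             if v == "" or any(b in v.lower() for b in bad):
--                 return True
--         if exclude_text_tokens:
--             return any(tok in t.lower() for tok in exclude_text_tokens)
--         return False
--
--     last1 = last2 = last3 = last_ok = None
--     for i, t in enumerate(texts):
--         if excluded(i, t):
--             continue
--         tl = t.lower()
--         last_ok = i
--         if any(k in tl for k in low1):
--             last1 = i
--         if any(k in tl for k in low2):
--             last2 = i
--         if any(k in tl for k in low3):
--             last3 = i
--     for cand in (last1, last2, last3, last_ok):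
--         if cand is not None:
--             return cand
--     return max(0, len(texts) - 1)
-- ===== Notes on version B (the rewrite author's own statement) =====
-- stated objective: simpler
-- what changed: Replaces A's three separate last_match scans over texts plus a fourth reverse fallback scan by a single forward pass that tracks the last non-excluded index matching each priority tier and the last non-excluded index overall, with the try/except around values[i] replaced by an explicit length guard.
import Mathlib
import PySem

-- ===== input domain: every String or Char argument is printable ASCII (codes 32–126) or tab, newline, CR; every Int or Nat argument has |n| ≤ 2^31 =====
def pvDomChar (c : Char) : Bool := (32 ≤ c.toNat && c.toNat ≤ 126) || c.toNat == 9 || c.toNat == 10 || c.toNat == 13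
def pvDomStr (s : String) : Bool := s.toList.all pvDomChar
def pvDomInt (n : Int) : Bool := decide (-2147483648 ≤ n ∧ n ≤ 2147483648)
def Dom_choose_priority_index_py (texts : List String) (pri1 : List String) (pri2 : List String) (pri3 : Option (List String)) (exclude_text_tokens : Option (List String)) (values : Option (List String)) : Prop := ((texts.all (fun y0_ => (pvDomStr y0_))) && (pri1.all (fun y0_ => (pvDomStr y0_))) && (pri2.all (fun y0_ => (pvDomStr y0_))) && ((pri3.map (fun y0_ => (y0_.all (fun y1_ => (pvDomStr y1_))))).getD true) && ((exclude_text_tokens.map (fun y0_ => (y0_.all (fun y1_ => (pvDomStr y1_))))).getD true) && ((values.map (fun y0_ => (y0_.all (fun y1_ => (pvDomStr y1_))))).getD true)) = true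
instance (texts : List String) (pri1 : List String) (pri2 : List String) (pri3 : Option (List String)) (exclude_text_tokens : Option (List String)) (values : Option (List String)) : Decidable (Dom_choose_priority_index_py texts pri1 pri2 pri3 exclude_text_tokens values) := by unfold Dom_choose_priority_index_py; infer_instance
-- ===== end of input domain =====

-- B replaces A's three separate last_match scans plus a fourth fallback scan by ONE forward pass
-- that tracks the last non-excluded index matching each tier (objective: simpler, one traversal).
-- Both programs are pure (no argument is mutated).

-- ===== PORT A =====
-- literal port of A's is_excluded: the only statement inside the try that can raise on a
-- well-typed input is values[i] (IndexError); the except swallows it and returns False,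
-- modelled by the `none => false` branch of pyGet?.
def pvBadToksA : List String := ["select", "choose", "---", "none"]

def pvTokExclA (texts : List String) (exclude_text_tokens : Option (List String)) (i : Int) : Bool :=
  match exclude_text_tokens with
  | some ts =>
    if !ts.isEmpty then
      match PySem.List.pyGet? texts i with
      | none => false   -- unreachable for the i used by A, kept for literalness (except → False)
      | some t => ts.any (fun tok => PySem.Str.isIn tok (PySem.Str.lower t))
    else false
  | none => false

def pvIsExcludedA (texts : List String) (exclude_text_tokens values : Option (List String)) (i : Int) : Bool :=
  match values with
  | some vs =>
    match PySem.List.pyGet? vs i with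
    | none => false   -- IndexError from values[i], swallowed by the except
    | some v0 =>
      let v := PySem.Str.strip v0
      if v == "" then true
      else if pvBadToksA.any (fun tok => PySem.Str.isIn tok (PySem.Str.lower v)) then true
      else pvTokExclA texts exclude_text_tokens i
  | none => pvTokExclA texts exclude_text_tokens i

def pvLastMatchA (texts : List String) (exclude_text_tokens values : Option (List String)) (keys : List String) : Option Int :=
  let low_keys := keys.map PySem.Str.lower
  let idxs := (PySem.List.enumerate texts 0).foldl
    (fun acc p =>
      if low_keys.any (fun k => PySem.Str.isIn k (PySem.Str.lower p.2)) then
        if !pvIsExcludedA texts exclude_text_tokens values p.1 then acc ++ [p.1] else acc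
      else acc) []
  idxs.getLast?

def choose_priority_index_py (texts : List String) (pri1 : List String) (pri2 : List String) (pri3 : Option (List String)) (exclude_text_tokens : Option (List String)) (values : Option (List String)) : Int :=
  match pvLastMatchA texts exclude_text_tokens values pri1 with
  | some i => i
  | none =>
  match pvLastMatchA texts exclude_text_tokens values pri2 with
  | some i => i
  | none =>
  match (match pri3 with
         | some p3 => if !p3.isEmpty then pvLastMatchA texts exclude_text_tokens values p3 else none
         | none => none) with
  | some i => i
  | none =>
  match (PySem.List.pyRange (PySem.List.len texts - 1) (-1) (-1)).find?
          (fun i => !pvIsExcludedA texts exclude_text_tokens values i) with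
  | some i => i
  | none => max 0 (PySem.List.len texts - 1)

-- ===== PORT B =====
def pvBadToksB : List String := ["select", "choose", "---", "none"]

def pvTokB (exclude_text_tokens : Option (List String)) (t : String) : Bool :=
  match exclude_text_tokens with
  | some ts => if !ts.isEmpty then ts.any (fun tok => PySem.Str.isIn tok (PySem.Str.lower t)) else false
  | none => false

def pvExcludedB (exclude_text_tokens values : Option (List String)) (i : Int) (t : String) : Bool :=
  match values with
  | some vs =>
    if PySem.List.len vs ≤ i then false
    else
      let v := PySem.Str.strip (PySem.List.pyGetD vs i "")
      if v == "" || pvBadToksB.any (fun b => PySem.Str.isIn b (PySem.Str.lower v)) then true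
      else pvTokB exclude_text_tokens t
  | none => pvTokB exclude_text_tokens t

def pvStepB (exclude_text_tokens values : Option (List String)) (low1 low2 low3 : List String)
    (st : Option Int × Option Int × Option Int × Option Int) (p : Int × String) :
    Option Int × Option Int × Option Int × Option Int :=
  if pvExcludedB exclude_text_tokens values p.1 p.2 then st
  else
    let tl := PySem.Str.lower p.2
    ( if low1.any (fun k => PySem.Str.isIn k tl) then some p.1 else st.1,
      if low2.any (fun k => PySem.Str.isIn k tl) then some p.1 else st.2.1,
      if low3.any (fun k => PySem.Str.isIn k tl) then some p.1 else st.2.2.1,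
      some p.1 )

def choose_priority_index_py_alt (texts : List String) (pri1 : List String) (pri2 : List String) (pri3 : Option (List String)) (exclude_text_tokens : Option (List String)) (values : Option (List String)) : Int :=
  let low1 := pri1.map PySem.Str.lower
  let low2 := pri2.map PySem.Str.lower
  let low3 := (pri3.getD []).map PySem.Str.lower
  let st := (PySem.List.enumerate texts 0).foldl
    (pvStepB exclude_text_tokens values low1 low2 low3) (none, none, none, none)
  match st.1 with
  | some i => i
  | none =>
  match st.2.1 with
  | some i => i
  | none =>
  match st.2.2.1 with
  | some i => i
  | none =>
  match st.2.2.2 with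
  | some i => i
  | none => max 0 (PySem.List.len texts - 1)

-- ===== PRECONDITION & SPEC =====
def Spec_choose_priority_index_py (texts : List String) (pri1 : List String) (pri2 : List String) (pri3 : Option (List String)) (exclude_text_tokens : Option (List String)) (values : Option (List String)) (out : Int) : Prop := out = choose_priority_index_py_alt texts pri1 pri2 pri3 exclude_text_tokens values
instance (texts : List String) (pri1 : List String) (pri2 : List String) (pri3 : Option (List String)) (exclude_text_tokens : Option (List String)) (values : Option (List String)) (out : Int) : Decidable (Spec_choose_priority_index_py texts pri1 pri2 pri3 exclude_text_tokens values out) := by unfold Spec_choose_priority_index_py; infer_instance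

-- ===== CLAIM (what is proved, stated in full; the proofs are below) =====
def Claim_equal_choose_priority_index_py : Prop := ∀ (texts : List String) (pri1 : List String) (pri2 : List String) (pri3 : Option (List String)) (exclude_text_tokens : Option (List String)) (values : Option (List String)), Dom_choose_priority_index_py texts pri1 pri2 pri3 exclude_text_tokens values → Spec_choose_priority_index_py texts pri1 pri2 pri3 exclude_text_tokens values (choose_priority_index_py texts pri1 pri2 pri3 exclude_text_tokens values)

-- ===== LEMMAS AND PROOFS =====

-- the two exclusion tests agree at an in-range index paired with its text
theorem pv_tok_eq (texts : List String) (ex : Option (List String)) (k : Nat) (h : k < texts.length) :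
    pvTokExclA texts ex k = pvTokB ex texts[k] := by
  cases ex with
  | none => rfl
  | some ts =>
    simp only [pvTokExclA, pvTokB, PySem.List.pyGet?_natCast, List.getElem?_eq_getElem h]

theorem pv_excl_eq (texts : List String) (ex values : Option (List String)) (k : Nat) (h : k < texts.length) :
    pvIsExcludedA texts ex values k = pvExcludedB ex values k texts[k] := by
  cases values with
  | none => simpa [pvIsExcludedA, pvExcludedB] using pv_tok_eq texts ex k h
  | some vs =>
    simp only [pvIsExcludedA, pvExcludedB, PySem.List.pyGet?_natCast, PySem.List.pyGetD_natCast,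
      PySem.List.len_eq]
    by_cases hk : k < vs.length
    · have hle : ¬ ((vs.length : Int) ≤ (k : Int)) := by exact_mod_cast Nat.not_le.mpr hk
      have hg : vs.getD k "" = vs[k] := List.getD_eq_getElem vs "" hk
      simp only [List.getElem?_eq_getElem hk, if_neg hle, hg]
      rcases h1 : (PySem.Str.strip vs[k] == "") with _ | _
      · rcases h2 : pvBadToksA.any (fun tok => PySem.Str.isIn tok (PySem.Str.lower (PySem.Str.strip vs[k]))) with _ | _
        · have h2' : pvBadToksB.any (fun tok => PySem.Str.isIn tok (PySem.Str.lower (PySem.Str.strip vs[k]))) = false := by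
            rw [← h2]; rfl
          simp only [h2', Bool.false_eq_true, if_false, Bool.or_self]
          exact pv_tok_eq texts ex k h
        · have h2' : pvBadToksB.any (fun tok => PySem.Str.isIn tok (PySem.Str.lower (PySem.Str.strip vs[k]))) = true := by
            rw [← h2]; rfl
          rw [h2']
          simp
      · simp
    · have hnone : vs[k]? = none := by simpa using List.getElem?_eq_none (by omega)
      have hle : ((vs.length : Int) ≤ (k : Int)) := by exact_mod_cast Nat.le_of_not_lt hk
      simp [hnone, hle]

-- last element of a conditional cons, pushed into the Option.or accumulator
theorem pv_or_cons {α : Type} (x : α) (r : List α) (o : Option α) :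
    ((x :: r).getLast?).or o = r.getLast?.or (some x) := by
  cases hr : r.getLast? <;> simp [List.getLast?_cons, hr]

-- A's accumulator loop is "last index of the filtered enumeration"
theorem pv_lastMatchA_eq (texts : List String) (ex values : Option (List String)) (keys : List String) :
    pvLastMatchA texts ex values keys =
      (((PySem.List.enumerate texts 0).filter
          (fun p => (keys.map PySem.Str.lower).any (fun k => PySem.Str.isIn k (PySem.Str.lower p.2))
                    && !pvIsExcludedA texts ex values p.1)).map (fun p => p.1)).getLast? := by
  unfold pvLastMatchA
  dsimp only
  have hfun : (fun (acc : List Int) (p : Int × String) =>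
      if (keys.map PySem.Str.lower).any (fun k => PySem.Str.isIn k (PySem.Str.lower p.2)) then
        if !pvIsExcludedA texts ex values p.1 then acc ++ [p.1] else acc
      else acc) =
      (fun acc p =>
        if ((keys.map PySem.Str.lower).any (fun k => PySem.Str.isIn k (PySem.Str.lower p.2))
            && !pvIsExcludedA texts ex values p.1) then acc ++ [p.1] else acc) := by
    funext acc p
    by_cases h1 : (keys.map PySem.Str.lower).any (fun k => PySem.Str.isIn k (PySem.Str.lower p.2)) = true <;>
      by_cases h2 : pvIsExcludedA texts ex values p.1 = true <;> simp [h2]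
  rw [hfun, PySem.List.foldl_append_if]
  simp

-- B's single pass, componentwise: each slot is "last filtered index or the previous value"
theorem pv_foldB_eq (ex values : Option (List String)) (low1 low2 low3 : List String) :
    ∀ (l : List (Int × String)) (st : Option Int × Option Int × Option Int × Option Int),
      l.foldl (pvStepB ex values low1 low2 low3) st =
        ( ((l.filter (fun p => low1.any (fun k => PySem.Str.isIn k (PySem.Str.lower p.2))
              && !pvExcludedB ex values p.1 p.2)).map (fun p => p.1)).getLast?.or st.1,
          ((l.filter (fun p => low2.any (fun k => PySem.Str.isIn k (PySem.Str.lower p.2))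
              && !pvExcludedB ex values p.1 p.2)).map (fun p => p.1)).getLast?.or st.2.1,
          ((l.filter (fun p => low3.any (fun k => PySem.Str.isIn k (PySem.Str.lower p.2))
              && !pvExcludedB ex values p.1 p.2)).map (fun p => p.1)).getLast?.or st.2.2.1,
          ((l.filter (fun p => !pvExcludedB ex values p.1 p.2)).map (fun p => p.1)).getLast?.or st.2.2.2 ) := by
  intro l
  induction l with
  | nil => intro st; simp
  | cons p l ih =>
    intro st
    rw [List.foldl_cons, ih]
    rcases he : pvExcludedB ex values p.1 p.2 with _ | _
    · simp only [pvStepB, he, Bool.false_eq_true, if_false, List.filter_cons, Bool.not_false,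
        Bool.and_true]
      refine Prod.ext ?_ (Prod.ext ?_ (Prod.ext ?_ ?_))
      · rcases h1 : low1.any (fun k => PySem.Str.isIn k (PySem.Str.lower p.2)) with _ | _ <;>
          simp only [Bool.false_eq_true, if_false, if_true, List.map_cons, pv_or_cons]
      · rcases h1 : low2.any (fun k => PySem.Str.isIn k (PySem.Str.lower p.2)) with _ | _ <;>
          simp only [Bool.false_eq_true, if_false, if_true, List.map_cons, pv_or_cons]
      · rcases h1 : low3.any (fun k => PySem.Str.isIn k (PySem.Str.lower p.2)) with _ | _ <;>
          simp only [Bool.false_eq_true, if_false, if_true, List.map_cons, pv_or_cons]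
      · simp only [if_true, List.map_cons, pv_or_cons]
    · simp only [pvStepB, he, if_true, List.filter_cons, Bool.not_true, Bool.and_false,
        Bool.false_eq_true, if_false]

-- on the pairs of enumerate texts 0 the two exclusion tests coincide
theorem pv_filter_congr (texts : List String) (ex values : Option (List String)) (low : List String) :
    (PySem.List.enumerate texts 0).filter
        (fun p => low.any (fun k => PySem.Str.isIn k (PySem.Str.lower p.2))
                  && !pvIsExcludedA texts ex values p.1) =
    (PySem.List.enumerate texts 0).filter
        (fun p => low.any (fun k => PySem.Str.isIn k (PySem.Str.lower p.2))
                  && !pvExcludedB ex values p.1 p.2) := by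
  apply List.filter_congr
  intro p hp
  rcases (PySem.List.mem_enumerate_iff texts 0 p).mp hp with ⟨k, hk, rfl⟩
  simp [pv_excl_eq texts ex values k hk]

theorem pv_filter_congr0 (texts : List String) (ex values : Option (List String)) :
    (PySem.List.enumerate texts 0).filter (fun p => !pvIsExcludedA texts ex values p.1) =
    (PySem.List.enumerate texts 0).filter (fun p => !pvExcludedB ex values p.1 p.2) := by
  apply List.filter_congr
  intro p hp
  rcases (PySem.List.mem_enumerate_iff texts 0 p).mp hp with ⟨k, hk, rfl⟩
  simp [pv_excl_eq texts ex values k hk]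

-- descending range(len-1, -1, -1) as a map over range
theorem pv_pyRange_desc (n : Nat) :
    PySem.List.pyRange ((n : Int) - 1) (-1) (-1) = (List.range n).map (fun k : Nat => (n : Int) - 1 - (k : Int)) := by
  unfold PySem.List.pyRange
  rcases Nat.eq_zero_or_pos n with h | h
  · subst h; norm_num
  · have h1 : ¬ ((-1 : Int) = 0) := by norm_num
    have h2 : ¬ ((0 : Int) < -1) := by norm_num
    have h3 : (-1 : Int) < (n : Int) - 1 := by
      have : (1 : Int) ≤ n := by exact_mod_cast h
      omega
    simp only [if_neg h1, if_neg (by norm_num : ¬ (0:Int) < -1), if_pos h3]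
    have hc : ((((n : Int) - 1) - (-1) + -(-1) - 1) / -(-1)).toNat = n := by
      have : (((n : Int) - 1) - (-1) + -(-1) - 1) / -(-1) = (n : Int) := by ring_nf; omega
      rw [this]; exact Int.toNat_natCast n
    rw [hc]
    apply List.map_congr_left
    intro k _
    ring

-- searching a descending range forward = taking the last hit of the ascending range
theorem pv_find_desc (P : Int → Bool) :
    ∀ n : Nat, ((List.range n).map (fun k : Nat => (n : Int) - 1 - (k : Int))).find? P =
      (((List.range n).map (fun k : Nat => (k : Int))).filter P).getLast? := by
  intro n
  induction n with
  | zero => simp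
  | succ n ih =>
    have hL : (List.range (n+1)).map (fun k : Nat => ((n+1 : Nat) : Int) - 1 - (k : Int)) =
        (n : Int) :: (List.range n).map (fun k : Nat => (n : Int) - 1 - (k : Int)) := by
      rw [List.range_succ_eq_map]
      simp only [List.map_cons, List.map_map]
      refine List.cons_eq_cons.mpr ⟨by push_cast; ring, List.map_congr_left ?_⟩
      intro a _
      simp only [Function.comp_apply]
      push_cast; ring
    have hR : (List.range (n+1)).map (fun k : Nat => (k : Int)) =
        (List.range n).map (fun k : Nat => (k : Int)) ++ [(n : Int)] := by
      rw [List.range_succ, List.map_append]; simp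
    rw [hL, hR, List.find?_cons, List.filter_append, List.getLast?_append]
    cases hP : P (n : Int) <;> simp [hP, ih]

-- the claim, as a standalone theorem the verdict cites
theorem pv_main (texts : List String) (pri1 : List String) (pri2 : List String)
    (pri3 : Option (List String)) (ex values : Option (List String)) :
    choose_priority_index_py texts pri1 pri2 pri3 ex values =
    choose_priority_index_py_alt texts pri1 pri2 pri3 ex values := by
  unfold choose_priority_index_py choose_priority_index_py_alt
  dsimp only
  rw [pv_foldB_eq]
  -- tier 1 and tier 2
  have e1 := (pv_lastMatchA_eq texts ex values pri1).trans
    (by rw [pv_filter_congr texts ex values (pri1.map PySem.Str.lower)])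
  have e2 := (pv_lastMatchA_eq texts ex values pri2).trans
    (by rw [pv_filter_congr texts ex values (pri2.map PySem.Str.lower)])
  -- tier 3: A guards on pri3 being truthy, B's key list is empty in exactly those cases
  have e3 : (match pri3 with
         | some p3 => if !p3.isEmpty then pvLastMatchA texts ex values p3 else none
         | none => none) =
      (((PySem.List.enumerate texts 0).filter
          (fun p => (((pri3.getD []).map PySem.Str.lower)).any (fun k => PySem.Str.isIn k (PySem.Str.lower p.2))
                    && !pvExcludedB ex values p.1 p.2)).map (fun p => p.1)).getLast? := by
    cases pri3 with
    | none => simp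
    | some p3 =>
      cases p3 with
      | nil => simp
      | cons a l =>
        simp only [List.isEmpty_cons, Bool.not_false, if_true, Option.getD_some]
        exact (pv_lastMatchA_eq texts ex values (a :: l)).trans
          (by rw [pv_filter_congr texts ex values ((a :: l).map PySem.Str.lower)])
  -- fallback scan
  have e4 : (PySem.List.pyRange (PySem.List.len texts - 1) (-1) (-1)).find?
          (fun i => !pvIsExcludedA texts ex values i) =
      (((PySem.List.enumerate texts 0).filter
          (fun p => !pvExcludedB ex values p.1 p.2)).map (fun p => p.1)).getLast? := by
    rw [← pv_filter_congr0 texts ex values]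
    have hmf : ((PySem.List.enumerate texts 0).filter
          (fun p => !pvIsExcludedA texts ex values p.1)).map (fun p => (p.1 : Int)) =
        ((PySem.List.enumerate texts 0).map (fun p => p.1)).filter
          (fun i => !pvIsExcludedA texts ex values i) := by
      rw [List.filter_map]; rfl
    rw [hmf, PySem.List.map_fst_enumerate, PySem.List.len_eq, zero_add,
      PySem.List.pyRange_zero_natCast, pv_pyRange_desc, pv_find_desc]
  rw [e4, ← e1, ← e2, ← e3]
  simp only [Option.or_none]

-- ===== VERDICT (by name: the statement is the Claim_ definition above) =====
theorem choose_priority_index_py_spec : Claim_equal_choose_priority_index_py := by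
  intro texts pri1 pri2 pri3 ex values _
  unfold Spec_choose_priority_index_py
  exact pv_main texts pri1 pri2 pri3 ex values
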